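-- pv_equiv track=rewrite | github.com/Hollex28/ALG | Practica 1/prac1.py | ejercicio2
-- ===== SOURCE A (Python) =====
-- def ejercicio2(cadena):
--     resultado = [];
--     for x in range(0,len(cadena)):
--         valor = 0;
--         for y in range(0, x):
--             if cadena[y] < cadena[x] and valor < resultado[y]:
--                 valor = resultado[y];
--         resultado.append(valor + 1);
--     return resultado;
-- ===== SOURCE B (Python) =====
-- import bisect
--
-- def ejercicio2(cadena):
--     # Patience-sorting LIS: tails[k] = smallest last value of a strictly
--     # increasing subsequence of length k+1 seen so far.
--     tails = []
--     res = []
--     for v in cadena: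
--         j = bisect.bisect_left(tails, v)
--         if j == len(tails):
--             tails.append(v)
--         else:
--             tails[j] = v
--         res.append(j + 1)
--     return res
-- ===== Notes on version B (the rewrite author's own statement) =====
-- stated objective: faster
-- what changed: Replaced the quadratic per-position rescan of all earlier dp values with patience sorting: a sorted list of minimal tail values queried and updated by binary search (bisect_left), so each position costs O(log n) instead of O(n).
import Mathlib
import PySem

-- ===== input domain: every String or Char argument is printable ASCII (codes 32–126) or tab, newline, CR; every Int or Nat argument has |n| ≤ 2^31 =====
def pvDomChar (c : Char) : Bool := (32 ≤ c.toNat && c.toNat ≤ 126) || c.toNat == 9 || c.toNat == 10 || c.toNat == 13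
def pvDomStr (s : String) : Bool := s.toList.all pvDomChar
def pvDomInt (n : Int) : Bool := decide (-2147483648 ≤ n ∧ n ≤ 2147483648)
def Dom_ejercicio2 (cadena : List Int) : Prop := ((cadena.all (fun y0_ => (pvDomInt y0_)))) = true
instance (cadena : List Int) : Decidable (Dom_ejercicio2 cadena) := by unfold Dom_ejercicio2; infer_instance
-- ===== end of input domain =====

-- B replaces A's O(n^2) nested scan with patience sorting (bisect on the list of
-- minimal tail values), computing the same per-position strict-LIS lengths in O(n log n).

-- ===== PORT A =====
-- for x in range(0,len(cadena)) / for y in range(0,x): every index is a Nat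
-- provably in range (y < x < len), so Nat ranges with getD indexing are exact here.
def ejercicio2 (cadena : List Int) : List Int :=
  (List.range cadena.length).foldl
    (fun resultado x =>
      let valor := (List.range x).foldl
        (fun valor y =>
          if cadena.getD y 0 < cadena.getD x 0 ∧ valor < resultado.getD y 0
          then resultado.getD y 0 else valor) 0
      resultado ++ [valor + 1]) []

-- ===== PORT B =====
-- bisect.bisect_left(tails, v): tails is kept sorted (strictly increasing), so the
-- insertion point is the length of the prefix of elements < v; ported as takeWhile.
def pyBisectLeft (tails : List Int) (v : Int) : Nat :=
  (tails.takeWhile (fun u => decide (u < v))).length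

-- one iteration of Source B's loop over the state (tails, res)
def lisStepB (st : List Int × List Int) (v : Int) : List Int × List Int :=
  let j := pyBisectLeft st.1 v
  (if j = st.1.length then st.1 ++ [v] else st.1.set j v, st.2 ++ [(j : Int) + 1])

def ejercicio2_alt (cadena : List Int) : List Int :=
  (cadena.foldl lisStepB ([], [])).2

-- ===== PRECONDITION & SPEC =====
def Spec_ejercicio2 (cadena : List Int) (out : List Int) : Prop := out = ejercicio2_alt cadena
instance (cadena : List Int) (out : List Int) : Decidable (Spec_ejercicio2 cadena out) := by unfold Spec_ejercicio2; infer_instance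

-- ===== CLAIM (what is proved, stated in full; the proofs are below) =====
def Claim_equal_ejercicio2 : Prop := ∀ (cadena : List Int), Dom_ejercicio2 cadena → Spec_ejercicio2 cadena (ejercicio2 cadena)

-- ===== LEMMAS AND PROOFS =====

-- Reference: the list of (value, dp) pairs, dp = length of longest strictly
-- increasing subsequence ending at that position, built left to right.
def lisMax (ps : List (Int × Int)) (v : Int) : Int :=
  ps.foldl (fun m p => if p.1 < v ∧ m < p.2 then p.2 else m) 0

def lisStep (ps : List (Int × Int)) (v : Int) : List (Int × Int) :=
  ps ++ [(v, lisMax ps v + 1)]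

def lisPairs (l : List Int) : List (Int × Int) := l.foldl lisStep []

theorem lisPairs_fst (l : List Int) : ∀ ps : List (Int × Int),
    (l.foldl lisStep ps).map Prod.fst = ps.map Prod.fst ++ l := by
  induction l with
  | nil => intro ps; simp
  | cons v t ih => intro ps; simp [List.foldl_cons, ih, lisStep]

theorem lisPairs_length (l : List Int) : (lisPairs l).length = l.length := by
  have h := lisPairs_fst l []
  have := congrArg List.length h
  simpa [lisPairs] using this

-- ---- properties of the running max lisMax ----
theorem lisMax_mono (v : Int) : ∀ (ps : List (Int × Int)) (m : Int),
    m ≤ ps.foldl (fun m p => if p.1 < v ∧ m < p.2 then p.2 else m) m := by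
  intro ps
  induction ps with
  | nil => intro m; simp
  | cons p t ih =>
    intro m
    simp only [List.foldl_cons]
    refine le_trans ?_ (ih _)
    split_ifs with h
    · exact le_of_lt h.2
    · exact le_refl m

theorem lisMax_ge (v : Int) : ∀ (ps : List (Int × Int)) (m u d : Int),
    (u, d) ∈ ps → u < v →
    d ≤ ps.foldl (fun m p => if p.1 < v ∧ m < p.2 then p.2 else m) m := by
  intro ps
  induction ps with
  | nil => intro m u d h; simp at h
  | cons p t ih =>
    intro m u d hmem huv
    simp only [List.mem_cons] at hmem
    simp only [List.foldl_cons]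
    rcases hmem with h | h
    · subst h
      refine le_trans ?_ (lisMax_mono v t _)
      simp only
      split_ifs with h
      · exact le_refl d
      · rw [not_and, not_lt] at h
        exact h huv
    · exact ih _ u d h huv

theorem lisMax_cases (v : Int) : ∀ (ps : List (Int × Int)) (m : Int),
    ps.foldl (fun m p => if p.1 < v ∧ m < p.2 then p.2 else m) m = m ∨
    ∃ u d, (u, d) ∈ ps ∧ u < v ∧
      ps.foldl (fun m p => if p.1 < v ∧ m < p.2 then p.2 else m) m = d := by
  intro ps
  induction ps with
  | nil => intro m; left; rfl
  | cons p t ih =>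
    intro m
    simp only [List.foldl_cons]
    by_cases h : p.1 < v ∧ m < p.2
    · rw [if_pos h]
      rcases ih p.2 with h2 | ⟨u, d, hm, hu, he⟩
      · right; exact ⟨p.1, p.2, List.mem_cons_self .., h.1, h2⟩
      · right; exact ⟨u, d, List.mem_cons_of_mem _ hm, hu, he⟩
    · rw [if_neg h]
      rcases ih m with h2 | ⟨u, d, hm, hu, he⟩
      · left; exact h2
      · right; exact ⟨u, d, List.mem_cons_of_mem _ hm, hu, he⟩

theorem lisMax_nonneg (ps : List (Int × Int)) (v : Int) : 0 ≤ lisMax ps v :=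
  lisMax_mono v ps 0

-- ---- generic bridge: a fold over range indices reading a list by getD is a fold over the list ----
theorem foldl_range_getD {α β : Type} (G : β → α → β) (d : α) :
    ∀ (ps : List α) (n : Nat), n = ps.length → ∀ (c : β),
      (List.range n).foldl (fun m y => G m (ps.getD y d)) c = ps.foldl G c := by
  intro ps
  induction ps using List.reverseRecOn with
  | nil => intro n hn c; subst hn; simp
  | append_singleton qs a ih =>
    intro n hn c
    subst hn
    rw [List.length_append, List.length_singleton, List.range_succ, List.foldl_append,
      List.foldl_append]
    have hcongr : (List.range qs.length).foldl (fun m y => G m ((qs ++ [a]).getD y d)) c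
        = (List.range qs.length).foldl (fun m y => G m (qs.getD y d)) c := by
      apply PySem.List.foldl_congr_mem
      intro acc y hy
      have hy' : y < qs.length := List.mem_range.mp hy
      rw [List.getD_eq_getElem _ _ (by simp; omega), List.getD_eq_getElem _ _ hy',
        List.getElem_append_left hy']
    have hlast : (qs ++ [a]).getD qs.length d = a := by
      rw [List.getD_eq_getElem _ _ (by simp), List.getElem_append_right (le_refl _)]
      simp
    rw [hcongr, ih qs.length rfl]
    simp only [List.foldl_cons, List.foldl_nil]
    rw [hlast]

-- ---- takeWhile facts (all elements of the prefix satisfy p; the next one does not) ----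
theorem takeWhile_getElem {α : Type} (p : α → Bool) :
    ∀ (l : List α) (k : Nat), k < (l.takeWhile p).length → ∀ (h2 : k < l.length),
      p l[k] = true := by
  intro l
  induction l with
  | nil => intro k hk; simp at hk
  | cons a t ih =>
    intro k hk h2
    by_cases hp : p a
    · rw [List.takeWhile_cons_of_pos hp] at hk
      cases k with
      | zero => simpa using hp
      | succ k =>
        simp only [List.length_cons, Nat.add_lt_add_iff_right] at hk h2 ⊢
        simpa using ih k hk (by omega)
    · rw [List.takeWhile_cons_of_neg (by simpa using hp)] at hk
      simp at hk

theorem takeWhile_next {α : Type} (p : α → Bool) :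
    ∀ (l : List α) (j : Nat), j = (l.takeWhile p).length → ∀ (h : j < l.length),
      p (l[j]'h) = false := by
  intro l
  induction l with
  | nil => intro j hj h; simp at h
  | cons a t ih =>
    intro j hj h
    by_cases hp : p a
    · rw [List.takeWhile_cons_of_pos hp] at hj
      simp only [List.length_cons] at hj
      cases j with
      | zero => omega
      | succ k =>
        have hk : k = (t.takeWhile p).length := by omega
        have h' : k < t.length := by simpa using h
        simpa using ih k hk h'
    · rw [List.takeWhile_cons_of_neg (by simpa using hp)] at hj
      simp only [List.length_nil] at hj
      subst hj
      simpa using hp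

theorem takeWhile_length_le {α : Type} (p : α → Bool) (l : List α) :
    (l.takeWhile p).length ≤ l.length :=
  (List.takeWhile_prefix p).length_le

-- ---- facts about the bisect index ----
theorem bisect_le (tails : List Int) (v : Int) : pyBisectLeft tails v ≤ tails.length :=
  takeWhile_length_le _ tails

theorem bisect_lt (tails : List Int) (v : Int) :
    ∀ k, k < pyBisectLeft tails v → ∀ (h2 : k < tails.length), tails[k] < v := by
  intro k hk h2
  have := takeWhile_getElem (fun u => decide (u < v)) tails k hk h2
  simpa using this

theorem bisect_not_lt (tails : List Int) (v : Int)
    (h : pyBisectLeft tails v < tails.length) : v ≤ tails[pyBisectLeft tails v] := by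
  have := takeWhile_next (fun u => decide (u < v)) tails (pyBisectLeft tails v) rfl h
  simpa using this

-- ---- the B-side invariant: every slot k of tails holds a value that occurs with
-- dp = k+1, and every recorded pair (u,d) has 1 ≤ d ≤ |tails| with all slots below d ≤ u ----
def InvB (ps : List (Int × Int)) (tails : List Int) : Prop :=
  (∀ k (hk : k < tails.length), (tails[k], (k : Int) + 1) ∈ ps) ∧
  (∀ u d, (u, d) ∈ ps →
    1 ≤ d ∧ d ≤ (tails.length : Int) ∧
    ∀ (k : Nat) (hk : k < tails.length), (k : Int) < d → tails[k] ≤ u)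

-- bisect_left on tails computes exactly A's inner running maximum
theorem bisect_eq_lisMax (ps : List (Int × Int)) (tails : List Int) (v : Int)
    (inv : InvB ps tails) : (pyBisectLeft tails v : Int) = lisMax ps v := by
  obtain ⟨i2, i1⟩ := inv
  set j := pyBisectLeft tails v with hj
  have hjle : j ≤ tails.length := bisect_le tails v
  have hge : (j : Int) ≤ lisMax ps v := by
    cases Nat.eq_zero_or_pos j with
    | inl h => rw [h]; exact_mod_cast lisMax_nonneg ps v
    | inr h =>
      have hk : j - 1 < j := by omega
      have hk2 : j - 1 < tails.length := by omega
      have hlt' := bisect_lt tails v (j - 1) hk hk2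
      have hmem := i2 (j - 1) hk2
      have h2 : ((j - 1 : Nat) : Int) + 1 ≤ lisMax ps v := by
        unfold lisMax
        exact lisMax_ge v ps 0 _ _ hmem hlt'
      omega
  have hle : lisMax ps v ≤ (j : Int) := by
    rcases lisMax_cases v ps 0 with h | ⟨u, d, hm, hu, he⟩
    · unfold lisMax; rw [h]; exact_mod_cast Nat.zero_le j
    · unfold lisMax; rw [he]
      by_contra hcon
      rw [not_le] at hcon
      obtain ⟨_, hdlen, hall⟩ := i1 u d hm
      have hjlen : j < tails.length := by omega
      have h1 : tails[j] ≤ u := hall j hjlen hcon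
      have h2 : v ≤ tails[j] := bisect_not_lt tails v hjlen
      omega
  omega

-- invariant preservation, append case (new longest length)
theorem invB_append (ps : List (Int × Int)) (tails : List Int) (v : Int)
    (inv : InvB ps tails) (hcase : pyBisectLeft tails v = tails.length) :
    InvB (lisStep ps v) (tails ++ [v]) := by
  obtain ⟨i2, i1⟩ := inv
  have hmax : (pyBisectLeft tails v : Int) = lisMax ps v := bisect_eq_lisMax ps tails v ⟨i2, i1⟩
  constructor
  · intro k hk
    simp only [List.length_append, List.length_singleton] at hk
    by_cases hkt : k < tails.length
    · rw [List.getElem_append_left hkt]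
      exact List.mem_append_left _ (i2 k hkt)
    · have hkeq : k = tails.length := by omega
      subst hkeq
      rw [List.getElem_append_right (le_refl _)]
      simp only [Nat.sub_self, List.getElem_cons_zero]
      have hd : (tails.length : Int) + 1 = lisMax ps v + 1 := by rw [← hmax, hcase]
      rw [hd]
      exact List.mem_append_right _ (by simp only [List.mem_singleton])
  · intro u d hm
    rcases List.mem_append.mp hm with hold | hnew
    · obtain ⟨hd1, hd2, hall⟩ := i1 u d hold
      refine ⟨hd1, ?_, ?_⟩
      · simp only [List.length_append, List.length_singleton]
        push_cast
        omega
      · intro k hk hkd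
        have hkt : k < tails.length := by omega
        rw [List.getElem_append_left hkt]
        exact hall k hkt hkd
    · simp only [List.mem_singleton, Prod.mk.injEq] at hnew
      obtain ⟨hu, hd⟩ := hnew
      have hnn := lisMax_nonneg ps v
      refine ⟨by omega, ?_, ?_⟩
      · simp only [List.length_append, List.length_singleton]
        rw [hd, ← hmax, hcase]
        push_cast
        omega
      · intro k hk hkd
        rw [hd, ← hmax, hcase] at hkd
        rw [hu]
        simp only [List.length_append, List.length_singleton] at hk
        by_cases hkt : k < tails.length
        · rw [List.getElem_append_left hkt]
          have hkb : k < pyBisectLeft tails v := by rw [hcase]; omega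
          exact le_of_lt (bisect_lt tails v k hkb hkt)
        · have hkeq : k = tails.length := by omega
          subst hkeq
          rw [List.getElem_append_right (le_refl _)]
          simp

-- invariant preservation, replace case (a smaller tail for this length)
theorem invB_set (ps : List (Int × Int)) (tails : List Int) (v : Int)
    (inv : InvB ps tails) (hcase : pyBisectLeft tails v ≠ tails.length) :
    InvB (lisStep ps v) (tails.set (pyBisectLeft tails v) v) := by
  obtain ⟨i2, i1⟩ := inv
  have hmax : (pyBisectLeft tails v : Int) = lisMax ps v := bisect_eq_lisMax ps tails v ⟨i2, i1⟩
  have hjle : pyBisectLeft tails v ≤ tails.length := bisect_le tails v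
  have hjlt : pyBisectLeft tails v < tails.length := by omega
  constructor
  · intro k hk
    simp only [List.length_set] at hk
    by_cases hkj : k = pyBisectLeft tails v
    · subst hkj
      rw [List.getElem_set_self, hmax]
      exact List.mem_append_right _ (by simp only [List.mem_singleton])
    · rw [List.getElem_set_ne (by omega)]
      exact List.mem_append_left _ (i2 k hk)
  · intro u d hm
    rcases List.mem_append.mp hm with hold | hnew
    · obtain ⟨hd1, hd2, hall⟩ := i1 u d hold
      refine ⟨hd1, by simpa using hd2, ?_⟩
      intro k hk hkd
      simp only [List.length_set] at hk
      by_cases hkj : k = pyBisectLeft tails v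
      · subst hkj
        rw [List.getElem_set_self]
        exact le_trans (bisect_not_lt tails v hjlt) (hall _ hk hkd)
      · rw [List.getElem_set_ne (by omega)]
        exact hall k hk hkd
    · simp only [List.mem_singleton, Prod.mk.injEq] at hnew
      obtain ⟨hu, hd⟩ := hnew
      have hnn := lisMax_nonneg ps v
      refine ⟨by omega, ?_, ?_⟩
      · simp only [List.length_set]
        rw [hd, ← hmax]
        omega
      · intro k hk hkd
        rw [hd, ← hmax] at hkd
        rw [hu]
        simp only [List.length_set] at hk
        by_cases hkj : k = pyBisectLeft tails v
        · subst hkj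
          rw [List.getElem_set_self]
        · have hklt : k < pyBisectLeft tails v := by
            have : (k : Int) < (pyBisectLeft tails v : Int) + 1 := hkd
            omega
          rw [List.getElem_set_ne (by omega)]
          exact le_of_lt (bisect_lt tails v k hklt hk)

-- ---- B computes the reference dp list ----
theorem B_fold (l : List Int) : ∀ (ps : List (Int × Int)) (tails : List Int),
    InvB ps tails →
    (l.foldl lisStepB (tails, ps.map Prod.snd)).2 = (l.foldl lisStep ps).map Prod.snd := by
  induction l with
  | nil => intro ps tails _; rfl
  | cons v t ih =>
    intro ps tails inv
    have hmax : (pyBisectLeft tails v : Int) = lisMax ps v := bisect_eq_lisMax ps tails v inv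
    have hstep : lisStepB (tails, ps.map Prod.snd) v
        = ((if pyBisectLeft tails v = tails.length then tails ++ [v]
            else tails.set (pyBisectLeft tails v) v),
           (lisStep ps v).map Prod.snd) := by
      simp [lisStepB, lisStep, hmax]
    simp only [List.foldl_cons, hstep]
    by_cases hcase : pyBisectLeft tails v = tails.length
    · rw [if_pos hcase]
      exact ih (lisStep ps v) _ (invB_append ps tails v inv hcase)
    · rw [if_neg hcase]
      exact ih (lisStep ps v) _ (invB_set ps tails v inv hcase)

theorem B_eq_ref (l : List Int) : ejercicio2_alt l = (lisPairs l).map Prod.snd := by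
  have hinv : InvB [] [] := by
    constructor
    · intro k hk; simp at hk
    · intro u d h; simp at h
  have := B_fold l [] [] hinv
  simpa [ejercicio2_alt, lisPairs] using this

-- ---- A computes the reference dp list ----
theorem A_take (l : List Int) : ∀ (n : Nat), n ≤ l.length →
    (List.range n).foldl
      (fun resultado x =>
        let valor := (List.range x).foldl
          (fun valor y =>
            if l.getD y 0 < l.getD x 0 ∧ valor < resultado.getD y 0
            then resultado.getD y 0 else valor) 0
        resultado ++ [valor + 1]) []
    = (lisPairs (l.take n)).map Prod.snd := by
  intro n
  induction n with
  | zero => intro _; simp [lisPairs]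
  | succ n ih =>
    intro hn
    have hn' : n ≤ l.length := by omega
    have hnlt : n < l.length := by omega
    rw [List.range_succ, List.foldl_append, ih hn']
    set ps := lisPairs (l.take n) with hps
    have hpslen : ps.length = n := by
      rw [hps, lisPairs_length, List.length_take]; omega
    have hpsfst : ps.map Prod.fst = l.take n := by
      have := lisPairs_fst (l.take n) []
      simpa [hps, lisPairs] using this
    -- the inner loop equals lisMax ps (l[n])
    have hinner :
        (List.range n).foldl
          (fun valor y =>
            if l.getD y 0 < l.getD n 0 ∧ valor < (ps.map Prod.snd).getD y 0
            then (ps.map Prod.snd).getD y 0 else valor) 0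
        = lisMax ps (l.getD n 0) := by
      have hcongr :
          (List.range n).foldl
            (fun valor y =>
              if l.getD y 0 < l.getD n 0 ∧ valor < (ps.map Prod.snd).getD y 0
              then (ps.map Prod.snd).getD y 0 else valor) 0
          = (List.range n).foldl
            (fun valor y =>
              if (ps.getD y (0, 0)).1 < l.getD n 0 ∧ valor < (ps.getD y (0, 0)).2
              then (ps.getD y (0, 0)).2 else valor) 0 := by
        apply PySem.List.foldl_congr_mem
        intro acc y hy
        have hy' : y < n := List.mem_range.mp hy
        have hyps : y < ps.length := by omega
        have hyl : y < l.length := by omega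
        have h1 : ps[y]?.map Prod.fst = (l.take n)[y]? := by
          rw [← List.getElem?_map, hpsfst]
        rw [List.getElem?_eq_getElem hyps, List.getElem?_take_of_lt hy',
          List.getElem?_eq_getElem hyl, Option.map_some] at h1
        have hfsteq : (ps[y]'hyps).1 = l[y]'hyl := Option.some.inj h1
        have hfst : l.getD y 0 = (ps.getD y (0, 0)).1 := by
          rw [List.getD_eq_getElem _ _ hyl, List.getD_eq_getElem _ _ hyps, hfsteq]
        have hsnd : (ps.map Prod.snd).getD y 0 = (ps.getD y (0, 0)).2 := by
          rw [List.getD_eq_getElem _ _ (by simpa using hyps), List.getD_eq_getElem _ _ hyps]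
          simp
        rw [hfst, hsnd]
      rw [hcongr]
      exact foldl_range_getD
        (fun valor p => if p.1 < l.getD n 0 ∧ valor < p.2 then p.2 else valor) (0, 0)
        ps n hpslen.symm 0
    -- taking one more element appends l[n]
    have htake : l.take (n + 1) = l.take n ++ [l.getD n 0] := by
      rw [List.take_add_one]
      congr 1
      rw [List.getElem?_eq_getElem hnlt, List.getD_eq_getElem _ _ hnlt]
      rfl
    have hpairs : lisPairs (l.take (n + 1)) = lisStep ps (l.getD n 0) := by
      rw [htake]
      simp [lisPairs, List.foldl_append, hps]
    rw [hpairs]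
    simp only [List.foldl_cons, List.foldl_nil, lisStep, List.map_append, List.map_cons,
      List.map_nil]
    rw [hinner]

theorem A_eq_ref (l : List Int) : ejercicio2 l = (lisPairs l).map Prod.snd := by
  have := A_take l l.length (le_refl _)
  simpa [ejercicio2] using this

-- ===== VERDICT (by name: the statement is the Claim_ definition above) =====
theorem ejercicio2_spec : Claim_equal_ejercicio2 := by
  intro cadena _
  unfold Spec_ejercicio2
  rw [A_eq_ref, B_eq_ref]
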